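-- pv_equiv track=rewrite | github.com/mortenjc/rosalind | python/PDPL/pdpl.py | deltax
-- ===== SOURCE A (Python) =====
-- def deltax(lst):
--     DX = []
--     for i in range(len(lst)):
--         for j in range(len(lst)):
--             if i == j:
--                 continue
--             if lst[i]-lst[j] >= 0:
--                 DX.append(lst[i]-lst[j])
--     return sorted(list(DX))
-- ===== SOURCE B (Python) =====
-- def deltax(lst):
--     # Frequency-map algorithm: count each distinct value once, then generate each
--     # distinct nonnegative difference with its multiplicity (count[a]*count[b] for
--     # a > b, and count[v]*(count[v]-1) zeros for the ordered equal pairs), and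
--     # emit the differences in sorted key order, each replicated.
--     cnt = {}
--     for v in lst:
--         cnt[v] = cnt.get(v, 0) + 1
--     zeros = 0
--     for v in cnt:
--         zeros += cnt[v] * (cnt[v] - 1)
--     diff = {0: zeros}
--     for a in cnt:
--         for b in cnt:
--             if a > b:
--                 diff[a - b] = diff.get(a - b, 0) + cnt[a] * cnt[b]
--     out = []
--     for d in sorted(diff):
--         out.extend([d] * diff[d])
--     return out
-- ===== Notes on version B (the rewrite author's own statement) =====
-- stated objective: faster
-- what changed: B replaces A's double loop over index pairs (skip i==j, test each difference, sort the n^2-element list) by a frequency map: it counts each value once, sums count[a]*count[b] per distinct value pair a>b into a difference->multiplicity dict (plus count[v]*(count[v]-1) zeros for equal pairs), sorts only the distinct difference keys and replicates each by its multiplicity.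
import Mathlib
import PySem

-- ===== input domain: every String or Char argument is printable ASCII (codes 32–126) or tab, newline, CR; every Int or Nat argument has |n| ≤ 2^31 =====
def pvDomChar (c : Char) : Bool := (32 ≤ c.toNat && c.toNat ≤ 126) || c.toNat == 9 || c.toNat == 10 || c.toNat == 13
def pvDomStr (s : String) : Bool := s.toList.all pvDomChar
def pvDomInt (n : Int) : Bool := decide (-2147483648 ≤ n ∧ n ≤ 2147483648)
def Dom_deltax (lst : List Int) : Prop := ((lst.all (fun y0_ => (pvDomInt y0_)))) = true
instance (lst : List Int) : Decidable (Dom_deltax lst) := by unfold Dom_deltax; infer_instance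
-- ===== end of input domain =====

-- B replaces A's double loop over index pairs (skip i==j, test each difference, sort the
-- n^2 differences) by a frequency map: count each distinct value once, accumulate each
-- distinct difference with its multiplicity (count[a]*count[b] for a>b, plus
-- count[v]*(count[v]-1) zeros), then emit sorted distinct differences replicated.

-- ===== PORT A =====
def deltax (lst : List Int) : List Int :=
  let DX : List Int :=
    (PySem.List.pyRange 0 (PySem.List.len lst) 1).foldl (fun DX i =>
      (PySem.List.pyRange 0 (PySem.List.len lst) 1).foldl (fun DX j =>
        if i = j then DX
        else if PySem.List.pyGetD lst i 0 - PySem.List.pyGetD lst j 0 ≥ 0 then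
          DX ++ [PySem.List.pyGetD lst i 0 - PySem.List.pyGetD lst j 0]
        else DX) DX) []
  PySem.List.sorted DX (fun x => x) false

-- ===== PORT B =====
def deltax_alt (lst : List Int) : List Int :=
  let cnt : PySem.Dict Int Int :=
    lst.foldl (fun d v => d.insert v (d.getD v 0 + 1)) PySem.Dict.empty
  let zeros : Int :=
    cnt.keys.foldl (fun z v => z + cnt.getD v 0 * (cnt.getD v 0 - 1)) 0
  let diff : PySem.Dict Int Int :=
    cnt.keys.foldl (fun dd a =>
      cnt.keys.foldl (fun dd b =>
        if a > b then dd.insert (a - b) (dd.getD (a - b) 0 + cnt.getD a 0 * cnt.getD b 0)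
        else dd) dd)
      (PySem.Dict.empty.insert 0 zeros)
  (PySem.List.sorted diff.keys (fun x => x) false).foldl
    (fun out d => out ++ List.replicate (diff.getD d 0).toNat d) []

-- ===== PRECONDITION & SPEC =====
def Spec_deltax (lst : List Int) (out : List Int) : Prop := out = deltax_alt lst
instance (lst : List Int) (out : List Int) : Decidable (Spec_deltax lst out) := by
  unfold Spec_deltax; infer_instance

-- ===== CLAIM (what is proved, stated in full; the proofs are below) =====
def Claim_equal_deltax : Prop := ∀ (lst : List Int), Dom_deltax lst → Spec_deltax lst (deltax lst)

-- ===== LEMMAS AND PROOFS =====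

-- A's row of differences for a fixed first index i, in closed form.
def rowA (lst : List Int) (i : Int) : List Int :=
  ((PySem.List.pyRange 0 (PySem.List.len lst) 1).filter
      (fun j => decide (¬ i = j ∧ PySem.List.pyGetD lst i 0 - PySem.List.pyGetD lst j 0 ≥ 0))).map
    (fun j => PySem.List.pyGetD lst i 0 - PySem.List.pyGetD lst j 0)

-- B's multiset of pairs-with-x≥y differences, diagonal included (the 'full' multiset).
def fullB (lst : List Int) : List Int :=
  lst.flatMap (fun x => (lst.filter (fun y => x ≥ y)).map (fun y => x - y))

lemma deltax_eq_sorted_flatMap (lst : List Int) :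
    deltax lst =
      PySem.List.sorted
        ((PySem.List.pyRange 0 (PySem.List.len lst) 1).flatMap (rowA lst)) (fun x => x) false := by
  unfold deltax
  have houter : ∀ (acc : List Int), ∀ i ∈ PySem.List.pyRange 0 (PySem.List.len lst) 1,
      (PySem.List.pyRange 0 (PySem.List.len lst) 1).foldl (fun DX j =>
        if i = j then DX
        else if PySem.List.pyGetD lst i 0 - PySem.List.pyGetD lst j 0 ≥ 0 then
          DX ++ [PySem.List.pyGetD lst i 0 - PySem.List.pyGetD lst j 0]
        else DX) acc = acc ++ rowA lst i := by
    intro acc i _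
    rw [PySem.List.foldl_congr_mem _ _
      (fun DX j => if (¬ i = j ∧ PySem.List.pyGetD lst i 0 - PySem.List.pyGetD lst j 0 ≥ 0)
        then DX ++ [PySem.List.pyGetD lst i 0 - PySem.List.pyGetD lst j 0] else DX) _
      (by intro acc' j _; dsimp only; split_ifs <;> tauto)]
    rw [PySem.List.foldl_append_ite]
    rfl
  rw [PySem.List.foldl_congr_mem _ _ (fun DX i => DX ++ rowA lst i) _
    (by intro acc i hi; exact houter acc i hi)]
  rw [PySem.List.foldl_append_eq_flatMap]
  rfl

-- pulling one element i (present, q i, list nodup) out of a filtered list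
lemma filter_perm_cons_filter_ne (q : Int → Prop) [DecidablePred q] (i : Int) (hqi : q i) :
    ∀ (r : List Int), r.Nodup → i ∈ r →
    (r.filter (fun j => decide (q j))).Perm
      (i :: r.filter (fun j => decide (q j ∧ ¬ j = i))) := by
  intro r
  induction r with
  | nil => intro _ h; cases h
  | cons a t ih =>
    intro hnd hi
    rw [List.nodup_cons] at hnd
    rcases List.mem_cons.mp hi with rfl | hit
    · have h1 : List.filter (fun j => decide (q j)) (i :: t)
          = i :: List.filter (fun j => decide (q j)) t := by
        simp [hqi]
      have h2 : List.filter (fun j => decide (q j ∧ ¬ j = i)) (i :: t)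
          = List.filter (fun j => decide (q j ∧ ¬ j = i)) t := by
        simp
      have h3 : List.filter (fun j => decide (q j ∧ ¬ j = i)) t
          = List.filter (fun j => decide (q j)) t := by
        apply List.filter_congr
        intro j hj
        have : ¬ j = i := fun h => hnd.1 (h ▸ hj)
        simp [this]
      rw [h1, h2, h3]
    · have hai : ¬ a = i := fun h => hnd.1 (h ▸ hit)
      by_cases hqa : q a
      · have h1 : List.filter (fun j => decide (q j)) (a :: t)
            = a :: List.filter (fun j => decide (q j)) t := by simp [hqa]
        have h2 : List.filter (fun j => decide (q j ∧ ¬ j = i)) (a :: t)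
            = a :: List.filter (fun j => decide (q j ∧ ¬ j = i)) t := by simp [hqa, hai]
        rw [h1, h2]
        exact ((ih hnd.2 hit).cons a).trans (List.Perm.swap i a _)
      · have h1 : List.filter (fun j => decide (q j)) (a :: t)
            = List.filter (fun j => decide (q j)) t := by simp [hqa]
        have h2 : List.filter (fun j => decide (q j ∧ ¬ j = i)) (a :: t)
            = List.filter (fun j => decide (q j ∧ ¬ j = i)) t := by simp [hqa]
        rw [h1, h2]
        exact ih hnd.2 hit

-- a flatMap whose every row starts with 0 is the zeros followed by the rows
lemma flatMap_cons_zero_perm (g : Int → List Int) :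
    ∀ (r : List Int),
      (r.flatMap (fun i => 0 :: g i)).Perm (List.replicate r.length 0 ++ r.flatMap g) := by
  intro r
  induction r with
  | nil => simp
  | cons a t ih =>
    simp only [List.flatMap_cons, List.length_cons, List.replicate_succ, List.cons_append]
    refine List.Perm.cons 0 ?_
    refine (List.Perm.append_left (g a) ih).trans ?_
    rw [← List.append_assoc, ← List.append_assoc]
    exact List.Perm.append_right _ List.perm_append_comm

-- B's full multiset is A's multiset plus one zero per element of lst
lemma full_perm (lst : List Int) :
    (fullB lst).Perm
      (List.replicate lst.length 0 ++
        (PySem.List.pyRange 0 (PySem.List.len lst) 1).flatMap (rowA lst)) := by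
  have hmap := PySem.List.map_pyGetD_pyRange_zero lst 0
  set r := PySem.List.pyRange 0 (PySem.List.len lst) 1 with hr
  set g := fun j => PySem.List.pyGetD lst j 0 with hg
  unfold fullB
  conv_lhs => rw [← hmap]
  rw [List.flatMap_map]
  have hrow : ∀ i ∈ r,
      (((List.map g r).filter (fun y => g i ≥ y)).map (fun y => g i - y)).Perm
        (0 :: rowA lst i) := by
    intro i hi
    rw [List.filter_map, List.map_map]
    have hperm := filter_perm_cons_filter_ne (fun j => g i ≥ g j) i (le_refl _) r
      (PySem.List.nodup_pyRange_one 0 (PySem.List.len lst)) hi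
    have hconv : r.filter (fun j => decide (g i ≥ g j ∧ ¬ j = i))
        = r.filter (fun j => decide (¬ i = j ∧ g i - g j ≥ 0)) := by
      apply List.filter_congr
      intro j _
      apply decide_eq_decide.mpr
      omega
    rw [hconv] at hperm
    have := hperm.map (fun j => g i - g j)
    simpa [rowA, Function.comp_def] using this
  have h1 : (r.flatMap fun i =>
        ((List.map g r).filter (fun y => g i ≥ y)).map (fun y => g i - y)).Perm
      (r.flatMap fun i => 0 :: rowA lst i) := List.Perm.flatMap_left r hrow
  have h2 := flatMap_cons_zero_perm (rowA lst) r
  have hlen : r.length = lst.length := by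
    rw [hr, PySem.List.length_pyRange_one]
    simp [PySem.List.len]
  refine h1.trans ?_
  rw [← hlen]
  exact h2

-- ===== new lemmas for the counter-based B =====

-- nested foldl over two lists is a foldl over the pair list
lemma foldl_pairs {α β γ : Type} (l1 : List α) (l2 : List β) (f : γ → α → β → γ) :
    ∀ (init : γ),
      l1.foldl (fun acc a => l2.foldl (fun acc b => f acc a b) acc) init
        = (l1.flatMap (fun a => l2.map (Prod.mk a))).foldl (fun acc p => f acc p.1 p.2) init := by
  induction l1 with
  | nil => intro init; rfl
  | cons a t ih =>
    intro init
    simp only [List.foldl_cons, List.flatMap_cons, List.foldl_append, List.foldl_map]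
    exact ih _

-- getD of the guarded accumulate-into-dict fold
lemma getD_foldl_guard_add (w : Int × Int → Int) (t : Int) :
    ∀ (ps : List (Int × Int)) (d0 : PySem.Dict Int Int),
      (ps.foldl (fun dd p =>
          if p.1 > p.2 then dd.insert (p.1 - p.2) (dd.getD (p.1 - p.2) 0 + w p) else dd)
        d0).getD t 0
      = d0.getD t 0
        + ((ps.filter (fun p => decide (p.1 > p.2 ∧ p.1 - p.2 = t))).map w).sum := by
  intro ps
  induction ps with
  | nil => intro d0; simp
  | cons p rest ih =>
    intro d0
    by_cases hg : p.1 > p.2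
    · by_cases ht : p.1 - p.2 = t
      · simp only [List.foldl_cons, if_pos hg, List.filter_cons]
        rw [ih]
        simp [hg, ht]
        ring
      · simp only [List.foldl_cons, if_pos hg, List.filter_cons]
        rw [ih]
        simp [PySem.Dict.getD_insert, hg, ht, Ne.symm ht]
    · simp only [List.foldl_cons, if_neg hg, List.filter_cons]
      rw [ih]
      simp [hg]

-- keys stay nodup through the guarded fold
lemma nodup_keys_foldl_guard (w : Int × Int → Int) :
    ∀ (ps : List (Int × Int)) (d0 : PySem.Dict Int Int), d0.keys.Nodup →
      ((ps.foldl (fun dd p =>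
          if p.1 > p.2 then dd.insert (p.1 - p.2) (dd.getD (p.1 - p.2) 0 + w p) else dd)
        d0)).keys.Nodup := by
  intro ps
  induction ps with
  | nil => intro d0 h; exact h
  | cons p rest ih =>
    intro d0 h
    simp only [List.foldl_cons]
    by_cases hg : p.1 > p.2
    · rw [if_pos hg]; exact ih _ (PySem.Dict.nodup_keys_insert _ _ _ h)
    · rw [if_neg hg]; exact ih _ h

-- sum of a pointwise-zero-except-one map over a nodup list
lemma sum_map_single (F : Int → Int) (t : Int) :
    ∀ (ks : List Int), ks.Nodup →
      (ks.map (fun k => if t = k then F k else 0)).sum = if t ∈ ks then F t else 0 := by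
  intro ks
  induction ks with
  | nil => intro _; simp
  | cons k rest ih =>
    intro hnd
    rw [List.nodup_cons] at hnd
    by_cases hk : t = k
    · subst hk
      simp [ih hnd.2, hnd.1]
    · simp [hk, ih hnd.2]

-- count in a flatMap of replicates over a nodup key list
lemma count_flatMap_replicate (m : Int → Nat) (t : Int) :
    ∀ (ks : List Int), ks.Nodup →
      ((ks.flatMap (fun k => List.replicate (m k) k)).count t) = if t ∈ ks then m t else 0 := by
  intro ks
  induction ks with
  | nil => intro _; simp
  | cons k rest ih =>
    intro hnd
    rw [List.nodup_cons] at hnd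
    by_cases hk : t = k
    · subst hk
      simp [List.count_append, ih hnd.2, hnd.1]
    · simp [List.count_append, List.count_replicate, hk, Ne.symm hk, ih hnd.2]

-- a flatMap of replicates over a ≤-pairwise key list is ≤-pairwise
lemma pairwise_flatMap_replicate (m : Int → Nat) :
    ∀ (ks : List Int), ks.Pairwise (· ≤ ·) →
      (ks.flatMap (fun k => List.replicate (m k) k)).Pairwise (· ≤ ·) := by
  intro ks
  induction ks with
  | nil => intro _; simp
  | cons k rest ih =>
    intro hpw
    rw [List.pairwise_cons] at hpw
    simp only [List.flatMap_cons]
    rw [List.pairwise_append]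
    refine ⟨List.pairwise_replicate_of_refl, ih hpw.2, ?_⟩
    intro a ha b hb
    rw [List.eq_of_mem_replicate ha]
    obtain ⟨k', hk', hbk'⟩ := List.mem_flatMap.mp hb
    rw [List.eq_of_mem_replicate hbk']
    exact hpw.1 k' hk'

-- count distributes over flatMap
lemma count_flatMap_sum (g : Int → List Int) (t : Int) :
    ∀ (l : List Int), (l.flatMap g).count t = (l.map (fun x => (g x).count t)).sum := by
  intro l
  induction l with
  | nil => simp
  | cons a rest ih => simp [List.count_append, ih]

-- sum of a map over a filter, as a sum of guarded terms
lemma sum_map_filter_eq (p : Int → Bool) (F : Int → Int) :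
    ∀ (l : List Int), ((l.filter p).map F).sum = (l.map (fun b => if p b then F b else 0)).sum := by
  intro l
  induction l with
  | nil => simp
  | cons a rest ih =>
    by_cases hp : p a
    · simp [hp, ih]
    · simp [hp, ih]

-- sum of a map over a flatMap, row by row
lemma sum_map_filter_flatMap (g : Int → List (Int × Int)) (P : Int × Int → Bool) (w : Int × Int → Int) :
    ∀ (l : List Int),
      (((l.flatMap g).filter P).map w).sum
        = (l.map (fun a => (((g a).filter P).map w).sum)).sum := by
  intro l
  induction l with
  | nil => simp
  | cons a rest ih => simp [List.filter_append, ih]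

-- sum of a map over a nodup list whose membership matches lst.toFinset
lemma sum_map_eq_finset_sum (lst K : List Int) (F : Int → Int)
    (hnd : K.Nodup) (hm : ∀ v, v ∈ K ↔ v ∈ lst) :
    (K.map F).sum = ∑ v ∈ lst.toFinset, F v := by
  rw [← List.sum_toFinset _ hnd]
  apply Finset.sum_congr _ (fun _ _ => rfl)
  ext v; simp [hm v]

-- proof-side names for B's intermediate values
def kB (lst : List Int) : List Int := (PySem.Dict.counter lst).keys

def cB (lst : List Int) (v : Int) : Int := (PySem.Dict.counter lst).getD v 0

def zerosB (lst : List Int) : Int :=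
  (kB lst).foldl (fun z v => z + cB lst v * (cB lst v - 1)) 0

def diffB (lst : List Int) : PySem.Dict Int Int :=
  (kB lst).foldl (fun dd a =>
    (kB lst).foldl (fun dd b =>
      if a > b then dd.insert (a - b) (dd.getD (a - b) 0 + cB lst a * cB lst b)
      else dd) dd)
    (PySem.Dict.empty.insert 0 (zerosB lst))

def outB (lst : List Int) : List Int :=
  (PySem.List.sorted (diffB lst).keys (fun x => x) false).flatMap
    (fun d => List.replicate ((diffB lst).getD d 0).toNat d)

lemma deltax_alt_eq (lst : List Int) : deltax_alt lst = outB lst := by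
  unfold deltax_alt outB diffB zerosB kB cB
  rw [PySem.Dict.foldl_insert_getD_add_one_eq_counter]
  rw [PySem.List.foldl_append_eq_flatMap]
  rfl

lemma mem_kB (lst : List Int) (v : Int) : v ∈ kB lst ↔ v ∈ lst := by
  unfold kB
  rw [PySem.Dict.keys_counter]
  exact PySem.Set.mem_ofList lst v

lemma nodup_kB (lst : List Int) : (kB lst).Nodup := PySem.Dict.nodup_keys_counter lst

lemma cB_eq_count (lst : List Int) (v : Int) : cB lst v = (lst.count v : Int) :=
  PySem.Dict.getD_counter lst v

lemma zerosB_eq (lst : List Int) :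
    zerosB lst = ((kB lst).map (fun v => cB lst v * (cB lst v - 1))).sum := by
  unfold zerosB
  rw [PySem.List.foldl_add]
  simp

lemma diffB_eq_pairfold (lst : List Int) :
    diffB lst
      = ((kB lst).flatMap (fun a => (kB lst).map (Prod.mk a))).foldl
          (fun dd p =>
            if p.1 > p.2 then dd.insert (p.1 - p.2) (dd.getD (p.1 - p.2) 0 + cB lst p.1 * cB lst p.2)
            else dd)
          (PySem.Dict.empty.insert 0 (zerosB lst)) := by
  unfold diffB
  exact foldl_pairs (kB lst) (kB lst)
    (fun (dd : PySem.Dict Int Int) (a b : Int) =>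
      if a > b then dd.insert (a - b) (dd.getD (a - b) 0 + cB lst a * cB lst b) else dd) _

-- the difference dictionary, looked up in closed form
lemma getD_diffB (lst : List Int) (t : Int) :
    (diffB lst).getD t 0
      = (if t = 0 then zerosB lst else 0)
        + ((((kB lst).flatMap (fun a => (kB lst).map (Prod.mk a))).filter
              (fun p => decide (p.1 > p.2 ∧ p.1 - p.2 = t))).map
            (fun p => cB lst p.1 * cB lst p.2)).sum := by
  rw [diffB_eq_pairfold]
  rw [getD_foldl_guard_add (fun p => cB lst p.1 * cB lst p.2)]
  rw [PySem.Dict.getD_insert]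
  simp

lemma nodup_keys_diffB (lst : List Int) : (diffB lst).keys.Nodup := by
  rw [diffB_eq_pairfold]
  exact nodup_keys_foldl_guard (fun p => cB lst p.1 * cB lst p.2) _ _
    (PySem.Dict.nodup_keys_insert _ _ _ (by simp))

lemma getD_diffB_neg (lst : List Int) (t : Int) (ht : t < 0) : (diffB lst).getD t 0 = 0 := by
  rw [getD_diffB]
  have hnil : (((kB lst).flatMap (fun a => (kB lst).map (Prod.mk a))).filter
      (fun p => decide (p.1 > p.2 ∧ p.1 - p.2 = t))) = [] := by
    apply List.filter_eq_nil_iff.mpr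
    intro p _
    simp only [decide_eq_true_eq]
    omega
  rw [hnil]
  have : ¬ t = 0 := by omega
  simp [this]

lemma getD_diffB_zero (lst : List Int) : (diffB lst).getD 0 0 = zerosB lst := by
  rw [getD_diffB]
  have hnil : (((kB lst).flatMap (fun a => (kB lst).map (Prod.mk a))).filter
      (fun p => decide (p.1 > p.2 ∧ p.1 - p.2 = 0))) = [] := by
    apply List.filter_eq_nil_iff.mpr
    intro p _
    simp only [decide_eq_true_eq]
    omega
  rw [hnil]
  simp

lemma getD_diffB_pos (lst : List Int) (t : Int) (ht : 0 < t) :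
    (diffB lst).getD t 0 = ((kB lst).map (fun a => cB lst a * cB lst (a - t))).sum := by
  rw [getD_diffB]
  have ht0 : ¬ t = 0 := by omega
  rw [if_neg ht0, sum_map_filter_flatMap]
  have hrow : ∀ a ∈ kB lst,
      ((((kB lst).map (Prod.mk a)).filter (fun p => decide (p.1 > p.2 ∧ p.1 - p.2 = t))).map
          (fun p => cB lst p.1 * cB lst p.2)).sum
        = cB lst a * cB lst (a - t) := by
    intro a _
    rw [List.filter_map, List.map_map]
    have hcong : (kB lst).filter ((fun p => decide (p.1 > p.2 ∧ p.1 - p.2 = t)) ∘ Prod.mk a)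
        = (kB lst).filter (fun b => decide (a - t = b)) := by
      apply List.filter_congr
      intro b _
      simp only [Function.comp_apply]
      apply decide_eq_decide.mpr
      omega
    rw [hcong]
    have := sum_map_filter_eq (fun b => decide (a - t = b))
      (fun b => cB lst a * cB lst b) (kB lst)
    rw [show ((fun p => cB lst p.1 * cB lst p.2) ∘ Prod.mk a) = fun b => cB lst a * cB lst b
      from rfl, this]
    have hsingle := sum_map_single (fun b => cB lst a * cB lst b) (a - t) (kB lst) (nodup_kB lst)
    simp only [decide_eq_true_eq] at hsingle ⊢
    rw [hsingle]
    by_cases hmem : a - t ∈ kB lst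
    · rw [if_pos hmem]
    · rw [if_neg hmem]
      have : lst.count (a - t) = 0 :=
        List.count_eq_zero.mpr (fun h => hmem ((mem_kB lst (a - t)).mpr h))
      rw [cB_eq_count lst (a - t), this]
      simp
  rw [List.map_eq_map_iff.mpr hrow]
  ring

-- the counted multiset B produces, as an Int-valued count
lemma count_outB (lst : List Int) (t : Int) :
    (((outB lst).count t : Int)) = (diffB lst).getD t 0 := by
  have hnd : (PySem.List.sorted (diffB lst).keys (fun x => x) false).Nodup :=
    (PySem.List.sorted_perm (diffB lst).keys (fun x => x) false).symm.nodup (nodup_keys_diffB lst)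
  unfold outB
  rw [count_flatMap_replicate (fun k => ((diffB lst).getD k 0).toNat) t _ hnd]
  by_cases hmem : t ∈ (diffB lst).keys
  · rw [if_pos ((PySem.List.mem_sorted _ _ _ _).mpr hmem)]
    have hnn : 0 ≤ (diffB lst).getD t 0 := by
      rcases lt_trichotomy t 0 with h | h | h
      · rw [getD_diffB_neg lst t h]
      · subst h
        rw [getD_diffB_zero, zerosB_eq]
        apply List.sum_nonneg
        intro x hx
        obtain ⟨v, hv, rfl⟩ := List.mem_map.mp hx
        have : 1 ≤ lst.count v :=
          List.count_pos_iff.mpr ((mem_kB lst v).mp hv)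
        rw [cB_eq_count]
        nlinarith [this]
      · rw [getD_diffB_pos lst t h]
        apply List.sum_nonneg
        intro x hx
        obtain ⟨v, hv, rfl⟩ := List.mem_map.mp hx
        rw [cB_eq_count, cB_eq_count]
        positivity
    simp [Int.toNat_of_nonneg hnn]
  · rw [if_neg (fun h => hmem ((PySem.List.mem_sorted _ _ _ _).mp h))]
    have : (diffB lst).getD t 0 = 0 := by
      apply PySem.Dict.getD_of_not_contains
      rw [PySem.Dict.contains_eq_decide_mem_keys]
      simp [hmem]
    rw [this]
    rfl

-- counting in the full multiset
lemma count_fullB (lst : List Int) (t : Int) :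
    (fullB lst).count t
      = if 0 ≤ t then (lst.map (fun x => lst.count (x - t))).sum else 0 := by
  unfold fullB
  rw [count_flatMap_sum]
  have hx : ∀ x ∈ lst,
      (((lst.filter (fun y => x ≥ y)).map (fun y => x - y)).count t)
        = if 0 ≤ t then lst.count (x - t) else 0 := by
    intro x _
    have hinj : Function.Injective (fun y => x - y) := by intro u v h; dsimp at h; omega
    have h1 : ((lst.filter (fun y => x ≥ y)).map (fun y => x - y)).count t
        = (lst.filter (fun y => x ≥ y)).count (x - t) := by
      have := List.count_map_of_injective (lst.filter (fun y => decide (x ≥ y)))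
        (fun y => x - y) hinj (x - t)
      simpa using this
    rw [h1]
    by_cases ht : 0 ≤ t
    · have h2 : List.count (x - t) (lst.filter (fun y => decide (x ≥ y)))
          = List.count (x - t) lst := List.count_filter (by simp; omega)
      rw [h2, if_pos ht]
    · rw [if_neg ht]
      apply List.count_eq_zero.mpr
      intro hmem
      have := (List.mem_filter.mp hmem).2
      simp at this
      omega
  rw [List.map_eq_map_iff.mpr hx]
  by_cases ht : 0 ≤ t
  · simp only [if_pos ht]
  · simp [if_neg ht]

-- the central permutation: the full multiset is lst.length zeros plus B's output
lemma perm_full_outB (lst : List Int) :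
    (fullB lst).Perm (List.replicate lst.length 0 ++ outB lst) := by
  apply List.perm_iff_count.mpr
  intro t
  have hInt : ((fullB lst).count t : Int)
      = ((List.replicate lst.length 0 ++ outB lst).count t : Int) := by
    rw [List.count_append, List.count_replicate]
    push_cast
    rw [count_outB]
    rcases lt_trichotomy t 0 with h | h | h
    · have h1 : ¬ (0:Int) ≤ t := by omega
      have h2 : ¬ t = 0 := by omega
      rw [count_fullB, if_neg h1, getD_diffB_neg lst t h]
      simp
      intro hcontra
      exact absurd hcontra.symm h2
    · subst h
      rw [count_fullB, if_pos (le_refl 0), getD_diffB_zero, zerosB_eq]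
      have hsum := Finset.sum_list_map_count lst (fun x => lst.count (x - 0))
      rw [hsum]
      have hzeros : ((kB lst).map (fun v => cB lst v * (cB lst v - 1))).sum
          = ∑ v ∈ lst.toFinset, ((lst.count v : Int) * ((lst.count v : Int) - 1)) := by
        rw [sum_map_eq_finset_sum lst (kB lst) _ (nodup_kB lst) (mem_kB lst)]
        apply Finset.sum_congr rfl
        intro v _
        rw [cB_eq_count]
      rw [hzeros]
      simp only [smul_eq_mul, sub_zero]
      push_cast
      rw [if_pos (rfl : true = true)]
      have hsplit : (∑ x ∈ lst.toFinset, ((List.count x lst : Int) * (List.count x lst : Int)))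
          = ∑ x ∈ lst.toFinset,
              ((List.count x lst : Int) + (List.count x lst : Int) * ((List.count x lst : Int) - 1)) := by
        apply Finset.sum_congr rfl
        intro v _
        ring
      have hlen : (∑ x ∈ lst.toFinset, (List.count x lst : Int)) = (lst.length : Int) := by
        exact_mod_cast congrArg (Nat.cast : Nat → Int) (List.sum_toFinset_count_eq_length lst)
      rw [hsplit, Finset.sum_add_distrib, hlen]
    · have h1 : (0:Int) ≤ t := by omega
      have h2 : ¬ t = 0 := by omega
      rw [count_fullB, if_pos h1, getD_diffB_pos lst t h]
      have hsum := Finset.sum_list_map_count lst (fun x => lst.count (x - t))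
      rw [hsum]
      have hrhs : ((kB lst).map (fun a => cB lst a * cB lst (a - t))).sum
          = ∑ v ∈ lst.toFinset, ((lst.count v : Int) * (lst.count (v - t) : Int)) := by
        rw [sum_map_eq_finset_sum lst (kB lst) _ (nodup_kB lst) (mem_kB lst)]
        apply Finset.sum_congr rfl
        intro v _
        rw [cB_eq_count, cB_eq_count]
      rw [hrhs]
      push_cast
      simp
      intro hcontra
      exact absurd hcontra.symm h2
  exact_mod_cast hInt

lemma pairwise_outB (lst : List Int) : (outB lst).Pairwise (· ≤ ·) := by
  unfold outB
  apply pairwise_flatMap_replicate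
  exact PySem.List.sorted_pairwise (diffB lst).keys (fun x => x)

-- ===== VERDICT (by name: the statement is the Claim_ definition above) =====
theorem deltax_spec : Claim_equal_deltax := by
  intro lst _
  unfold Spec_deltax
  rw [deltax_eq_sorted_flatMap, deltax_alt_eq]
  apply PySem.List.sorted_id_eq_of_perm_of_pairwise
  · have h1 := full_perm lst
    have h2 := perm_full_outB lst
    have h3 : (List.replicate lst.length 0 ++ outB lst).Perm
        (List.replicate lst.length 0 ++
          (PySem.List.pyRange 0 (PySem.List.len lst) 1).flatMap (rowA lst)) :=
      h2.symm.trans h1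
    exact (List.perm_append_left_iff _).mp h3
  · exact pairwise_outB lst
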